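-- pv_equiv track=rewrite | github.com/aragaer/advent-of-code | adv24.py | build_bridge
-- ===== SOURCE A (Python) =====
-- def build_bridge(n, components):
--     result = 0
--     length = 0
--     bridge = []
--     for i, c in enumerate(components):
--         nl = 0
--         nr = 0
--         nb = None
--         if c[0] == n:
--             nr, nl, nb = build_bridge(c[1], components[:i]+components[i+1:])
--             nl += 1
--             nr += c[0] + c[1]
--             nb.append(c)
--         elif c[1] == n:
--             nr, nl, nb = build_bridge(c[0], components[:i]+components[i+1:])
--             nl += 1
--             nr += c[0] + c[1]
--             nb.append(c)
--         if nl and nl >= length: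
--             result = nr
--             length = nl
--             bridge = nb
--     return result, length, bridge
-- ===== SOURCE B (Python) =====
-- def build_bridge(n, components):
--     # Memoized search: states keyed by (port, remaining subsequence), so
--     # permutation-equivalent search branches are computed once.
--     memo = {}
--
--     def solve(port, remaining):
--         key = (port, remaining)
--         hit = memo.get(key)
--         if hit is not None:
--             return hit
--         best = (0, 0, [])
--         for pos, c in enumerate(remaining):
--             if c[0] == port:
--                 nxt = c[1]
--             elif c[1] == port:
--                 nxt = c[0]
--             else:
--                 continue
--             r, l, b = solve(nxt, remaining[:pos] + remaining[pos + 1:])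
--             if l + 1 >= best[1]:
--                 best = (r + c[0] + c[1], l + 1, b + [c])
--         memo[key] = best
--         return best
--
--     return solve(n, tuple(components))
-- ===== Notes on version B (the rewrite author's own statement) =====
-- stated objective: faster
-- what changed: B replaces A's naive search that re-explores every removal ordering by a memoized recursion keyed on (port, remaining subsequence of components), so permutation-equivalent branches are computed once.
import Mathlib
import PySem

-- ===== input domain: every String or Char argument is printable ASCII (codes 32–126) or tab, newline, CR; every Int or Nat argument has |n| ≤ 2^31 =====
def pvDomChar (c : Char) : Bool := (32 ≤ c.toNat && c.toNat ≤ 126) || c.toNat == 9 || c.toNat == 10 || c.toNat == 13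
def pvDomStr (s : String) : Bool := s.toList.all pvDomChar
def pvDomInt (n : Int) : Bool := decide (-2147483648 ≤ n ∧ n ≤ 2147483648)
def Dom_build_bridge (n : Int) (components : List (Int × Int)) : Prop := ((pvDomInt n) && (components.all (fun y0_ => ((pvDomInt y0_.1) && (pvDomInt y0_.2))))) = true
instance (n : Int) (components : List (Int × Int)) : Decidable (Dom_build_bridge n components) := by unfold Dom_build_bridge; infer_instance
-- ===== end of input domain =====

-- B replaces A's naive factorial search over removal orders by a memoized search keyed on
-- (port, remaining subsequence), so permutation-equivalent branches are computed once (alternative/faster).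

-- ===== PORT A =====
-- Literal transliteration of A; 'fuel' is only a totality guard (the Python recursion
-- terminates because the component list shrinks); build_bridge supplies fuel = components.length.
-- Python's 'if nl and nl >= length' is ported as 'nl ≠ 0 ∧ nl ≥ length'; in the no-match case
-- nl = 0 so the Python check fails and the accumulator is kept, which is 'else acc' here.
def pvBBA : Nat → Int → List (Int × Int) → Int × Int × List (Int × Int)
  | 0, _, _ => (0, 0, [])
  | fuel + 1, n, comps =>
    (PySem.List.enumerate comps 0).foldl
      (fun acc ic =>
        if ic.2.1 == n then
          let r := pvBBA fuel ic.2.2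
            (PySem.List.slice comps none (some ic.1) ++ PySem.List.slice comps (some (ic.1 + 1)) none)
          if r.2.1 + 1 ≠ 0 ∧ r.2.1 + 1 ≥ acc.2.1 then
            (r.1 + ic.2.1 + ic.2.2, r.2.1 + 1, r.2.2 ++ [ic.2])
          else acc
        else if ic.2.2 == n then
          let r := pvBBA fuel ic.2.1
            (PySem.List.slice comps none (some ic.1) ++ PySem.List.slice comps (some (ic.1 + 1)) none)
          if r.2.1 + 1 ≠ 0 ∧ r.2.1 + 1 ≥ acc.2.1 then
            (r.1 + ic.2.1 + ic.2.2, r.2.1 + 1, r.2.2 ++ [ic.2])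
          else acc
        else acc)
      (0, 0, [])

def build_bridge (n : Int) (components : List (Int × Int)) : Int × Int × (List (Int × Int)) :=
  pvBBA components.length n components

-- ===== PORT B =====
abbrev pvMemo := PySem.Dict (Int × List (Int × Int)) (Int × Int × List (Int × Int))

-- Transliteration of B's inner 'solve' with the memo dict threaded explicitly; 'fuel' is only a
-- totality guard (every call has remaining.length < fuel), supplied as components.length + 1.
-- Python's 'if c0==port: nxt=c1 elif c1==port: nxt=c0 else: continue' is ported as the equivalent
-- 'if c0==port || c1==port then nxt := if c0==port then c1 else c0 … else acc'.
def pvSolve : Nat → pvMemo → Int → List (Int × Int) → (Int × Int × List (Int × Int)) × pvMemo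
  | 0, memo, _, _ => ((0, 0, []), memo)
  | fuel + 1, memo, port, rem =>
    match memo.get? (port, rem) with
    | some v => (v, memo)
    | none =>
      let s :=
        (PySem.List.enumerate rem 0).foldl
          (fun acc pc =>
            if pc.2.1 == port || pc.2.2 == port then
              let nxt := if pc.2.1 == port then pc.2.2 else pc.2.1
              let t := pvSolve fuel acc.2 nxt
                (PySem.List.slice rem none (some pc.1) ++ PySem.List.slice rem (some (pc.1 + 1)) none)
              if t.1.2.1 + 1 ≥ acc.1.2.1 then
                ((t.1.1 + pc.2.1 + pc.2.2, t.1.2.1 + 1, t.1.2.2 ++ [pc.2]), t.2)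
              else (acc.1, t.2)
            else acc)
          ((0, 0, []), memo)
      (s.1, s.2.insert (port, rem) s.1)

def build_bridge_alt (n : Int) (components : List (Int × Int)) : Int × Int × (List (Int × Int)) :=
  (pvSolve (components.length + 1) PySem.Dict.empty n components).1

-- ===== PRECONDITION & SPEC =====
def Spec_build_bridge (n : Int) (components : List (Int × Int)) (out : Int × Int × (List (Int × Int))) : Prop := out = build_bridge_alt n components
instance (n : Int) (components : List (Int × Int)) (out : Int × Int × (List (Int × Int))) : Decidable (Spec_build_bridge n components out) := by unfold Spec_build_bridge; infer_instance

-- ===== CLAIM (what is proved, stated in full; the proofs are below) =====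
def Claim_equal_build_bridge : Prop := ∀ (n : Int) (components : List (Int × Int)), Dom_build_bridge n components → Spec_build_bridge n components (build_bridge n components)

-- ===== LEMMAS AND PROOFS =====

theorem pv_foldl_nonneg {α β : Type} (f : (Int × Int × β) → α → (Int × Int × β))
    (hf : ∀ acc x, 0 ≤ acc.2.1 → 0 ≤ (f acc x).2.1) :
    ∀ (l : List α) (acc : Int × Int × β), 0 ≤ acc.2.1 → 0 ≤ (l.foldl f acc).2.1 := by
  intro l
  induction l with
  | nil => intro acc h; simpa using h
  | cons x xs ih => intro acc h; simpa using ih (f acc x) (hf acc x h)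

theorem pvBBA_nonneg (fuel : Nat) (n : Int) (comps : List (Int × Int)) :
    0 ≤ (pvBBA fuel n comps).2.1 := by
  cases fuel with
  | zero => simp [pvBBA]
  | succ fuel =>
    rw [pvBBA]
    apply pv_foldl_nonneg
    · intro acc ic h
      dsimp only
      split_ifs with h1 h2 h3 h4 <;> simp_all <;> omega
    · simp

def pvInv (m : pvMemo) : Prop :=
  ∀ (p : Int) (rem : List (Int × Int)) (v : Int × Int × List (Int × Int)),
    m.get? (p, rem) = some v → v = pvBBA rem.length p rem

-- The loop body of pvBBA at fuel level 'fuel + 1' (recursive calls use 'fuel').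
def pvStepA (fuel : Nat) (n : Int) (comps : List (Int × Int))
    (acc : Int × Int × List (Int × Int)) (ic : Int × (Int × Int)) : Int × Int × List (Int × Int) :=
  if ic.2.1 == n then
    let r := pvBBA fuel ic.2.2
      (PySem.List.slice comps none (some ic.1) ++ PySem.List.slice comps (some (ic.1 + 1)) none)
    if r.2.1 + 1 ≠ 0 ∧ r.2.1 + 1 ≥ acc.2.1 then
      (r.1 + ic.2.1 + ic.2.2, r.2.1 + 1, r.2.2 ++ [ic.2])
    else acc
  else if ic.2.2 == n then
    let r := pvBBA fuel ic.2.1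
      (PySem.List.slice comps none (some ic.1) ++ PySem.List.slice comps (some (ic.1 + 1)) none)
    if r.2.1 + 1 ≠ 0 ∧ r.2.1 + 1 ≥ acc.2.1 then
      (r.1 + ic.2.1 + ic.2.2, r.2.1 + 1, r.2.2 ++ [ic.2])
    else acc
  else acc

theorem pvBBA_succ (fuel : Nat) (n : Int) (comps : List (Int × Int)) :
    pvBBA (fuel + 1) n comps =
      (PySem.List.enumerate comps 0).foldl (pvStepA fuel n comps) (0, 0, []) := by
  rw [pvBBA]; rfl

-- The loop body of pvSolve at fuel level 'fuel + 1'.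
def pvStepB (fuel : Nat) (port : Int) (rem : List (Int × Int))
    (acc : (Int × Int × List (Int × Int)) × pvMemo) (pc : Int × (Int × Int)) :
    (Int × Int × List (Int × Int)) × pvMemo :=
  if pc.2.1 == port || pc.2.2 == port then
    let nxt := if pc.2.1 == port then pc.2.2 else pc.2.1
    let t := pvSolve fuel acc.2 nxt
      (PySem.List.slice rem none (some pc.1) ++ PySem.List.slice rem (some (pc.1 + 1)) none)
    if t.1.2.1 + 1 ≥ acc.1.2.1 then
      ((t.1.1 + pc.2.1 + pc.2.2, t.1.2.1 + 1, t.1.2.2 ++ [pc.2]), t.2)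
    else (acc.1, t.2)
  else acc

theorem pvSolve_succ_none (fuel : Nat) (memo : pvMemo) (port : Int) (rem : List (Int × Int))
    (h : memo.get? (port, rem) = none) :
    pvSolve (fuel + 1) memo port rem =
      (((PySem.List.enumerate rem 0).foldl (pvStepB fuel port rem) ((0, 0, []), memo)).1,
        (((PySem.List.enumerate rem 0).foldl (pvStepB fuel port rem) ((0, 0, []), memo)).2).insert
          (port, rem)
          (((PySem.List.enumerate rem 0).foldl (pvStepB fuel port rem) ((0, 0, []), memo)).1)) := by
  rw [pvSolve, h]; rfl

theorem pv_slice_pair (rem : List (Int × Int)) (k : Nat) :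
    PySem.List.slice rem none (some ((k : Int))) ++
      PySem.List.slice rem (some ((k : Int) + 1)) none = rem.take k ++ rem.drop (k + 1) := by
  rw [PySem.List.slice_to_natCast]
  congr 1
  rw [show ((k : Int) + 1) = (((k + 1 : Nat)) : Int) by push_cast; ring,
    PySem.List.slice_from_natCast]

theorem pvStep_rel (fuel m : Nat) (port : Int) (rem : List (Int × Int))
    (hm : rem.length = m + 1) (hfuel : m < fuel)
    (IH : ∀ (memo : pvMemo) (p : Int) (r : List (Int × Int)), r.length < fuel → pvInv memo →
      (pvSolve fuel memo p r).1 = pvBBA r.length p r ∧ pvInv (pvSolve fuel memo p r).2)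
    (k : Nat) (hk : k < rem.length) (accA : Int × Int × List (Int × Int)) (mm : pvMemo)
    (hmm : pvInv mm) :
    ∃ mm', pvStepB fuel port rem (accA, mm) ((k : Int), rem[k]) =
        (pvStepA m port rem accA ((k : Int), rem[k]), mm') ∧ pvInv mm' := by
  unfold pvStepA pvStepB
  dsimp only
  rw [pv_slice_pair]
  have hlen' : (rem.take k ++ rem.drop (k + 1)).length = m := by
    simp [List.length_take, List.length_drop]; omega
  by_cases h1 : rem[k].1 = port
  · have h1' : (rem[k].1 == port) = true := by simpa using h1
    have hIH := IH mm rem[k].2 (rem.take k ++ rem.drop (k + 1)) (by omega) hmm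
    have hnn := pvBBA_nonneg m rem[k].2 (rem.take k ++ rem.drop (k + 1))
    refine ⟨(pvSolve fuel mm rem[k].2 (rem.take k ++ rem.drop (k + 1))).2, ?_, hIH.2⟩
    rw [hlen'] at hIH
    by_cases hge : (pvBBA m rem[k].2 (rem.take k ++ rem.drop (k + 1))).2.1 + 1 ≥ accA.2.1
    · simp [h1', hIH.1, hge,
        show (pvBBA m rem[k].2 (rem.take k ++ rem.drop (k + 1))).2.1 + 1 ≠ 0 by omega]
    · simp [h1', hIH.1, hge]
  · have h1' : (rem[k].1 == port) = false := by simpa using h1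
    by_cases h2 : rem[k].2 = port
    · have h2' : (rem[k].2 == port) = true := by simpa using h2
      have hIH := IH mm rem[k].1 (rem.take k ++ rem.drop (k + 1)) (by omega) hmm
      have hnn := pvBBA_nonneg m rem[k].1 (rem.take k ++ rem.drop (k + 1))
      refine ⟨(pvSolve fuel mm rem[k].1 (rem.take k ++ rem.drop (k + 1))).2, ?_, hIH.2⟩
      rw [hlen'] at hIH
      by_cases hge : (pvBBA m rem[k].1 (rem.take k ++ rem.drop (k + 1))).2.1 + 1 ≥ accA.2.1
      · simp [h1', h2', hIH.1, hge,
          show (pvBBA m rem[k].1 (rem.take k ++ rem.drop (k + 1))).2.1 + 1 ≠ 0 by omega]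
      · simp [h1', h2', hIH.1, hge]
    · have h2' : (rem[k].2 == port) = false := by simpa using h2
      exact ⟨mm, by simp [h1', h2'], hmm⟩

theorem pvLoop (fuel m : Nat) (port : Int) (rem : List (Int × Int))
    (hm : rem.length = m + 1) (hfuel : m < fuel)
    (IH : ∀ (memo : pvMemo) (p : Int) (r : List (Int × Int)), r.length < fuel → pvInv memo →
      (pvSolve fuel memo p r).1 = pvBBA r.length p r ∧ pvInv (pvSolve fuel memo p r).2) :
    ∀ (items : List (Int × (Int × Int))),
      (∀ p ∈ items, ∃ (k : Nat) (_ : k < rem.length), p = ((k : Int), rem[k])) →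
      ∀ (accA : Int × Int × List (Int × Int)) (mm : pvMemo), pvInv mm →
        (items.foldl (pvStepB fuel port rem) (accA, mm)).1 =
            items.foldl (pvStepA m port rem) accA ∧
          pvInv (items.foldl (pvStepB fuel port rem) (accA, mm)).2 := by
  intro items
  induction items with
  | nil => intro _ accA mm hmm; exact ⟨rfl, hmm⟩
  | cons p items ih =>
    intro hmem accA mm hmm
    obtain ⟨k, hk, rfl⟩ := hmem p List.mem_cons_self
    simp only [List.foldl_cons]
    obtain ⟨mm', heq, hmm'⟩ := pvStep_rel fuel m port rem hm hfuel IH k hk accA mm hmm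
    rw [heq]
    exact ih (fun q hq => hmem q (List.mem_cons_of_mem _ hq)) _ mm' hmm'

theorem pvSolve_correct :
    ∀ (fuel : Nat) (memo : pvMemo) (port : Int) (rem : List (Int × Int)),
      rem.length < fuel → pvInv memo →
      (pvSolve fuel memo port rem).1 = pvBBA rem.length port rem ∧
        pvInv (pvSolve fuel memo port rem).2 := by
  intro fuel
  induction fuel with
  | zero => intro _ _ _ h _; omega
  | succ fuel IH =>
    intro memo port rem hlen hinv
    cases hget : memo.get? (port, rem) with
    | some v =>
      rw [pvSolve, hget]
      exact ⟨hinv _ _ _ hget, hinv⟩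
    | none =>
      rw [pvSolve_succ_none fuel memo port rem hget]
      cases hm : rem.length with
      | zero =>
        have : rem = [] := List.length_eq_zero_iff.mp hm
        subst this
        constructor
        · simp [PySem.List.enumerate_nil, pvBBA]
        · intro p r v hv
          rw [PySem.Dict.get?_insert] at hv
          split at hv
          · rename_i hkey
            obtain ⟨h1, h2⟩ := Prod.mk.injEq .. ▸ hkey
            cases hv
            subst h1; subst h2
            simp [PySem.List.enumerate_nil, pvBBA]
          · exact hinv _ _ _ hv
      | succ m =>
        have hmem : ∀ p ∈ PySem.List.enumerate rem 0,
            ∃ (k : Nat) (_ : k < rem.length), p = ((k : Int), rem[k]) := by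
          intro p hp
          rw [PySem.List.mem_enumerate_iff] at hp
          obtain ⟨k, hk, rfl⟩ := hp
          exact ⟨k, hk, by simp⟩
        have hloop := pvLoop fuel m port rem hm (by omega) IH
          (PySem.List.enumerate rem 0) hmem (0, 0, []) memo hinv
        constructor
        · rw [pvBBA_succ]
          exact hloop.1
        · intro p r v hv
          rw [PySem.Dict.get?_insert] at hv
          split at hv
          · rename_i hkey
            obtain ⟨h1, h2⟩ := Prod.mk.injEq .. ▸ hkey
            cases hv
            subst h1; subst h2
            rw [hm, pvBBA_succ]
            exact hloop.1
          · exact hloop.2 _ _ _ hv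

-- ===== VERDICT (by name: the statement is the Claim_ definition above) =====
theorem build_bridge_spec : Claim_equal_build_bridge := by
  intro n components _
  unfold Spec_build_bridge build_bridge build_bridge_alt
  have h := pvSolve_correct (components.length + 1) PySem.Dict.empty n components
    (by omega) (by intro p r v hv; simp [PySem.Dict.get?_empty] at hv)
  exact h.1.symm
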